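-- pv_equiv track=rewrite | github.com/Vova9299-pixel/scan-visualizer | new_code.py | _find_valid_neighbors
-- ===== SOURCE A (Python) =====
-- def _find_valid_neighbors(contours, current_idx):
--     n = len(contours)
--     prev_idx, next_idx = -1, -1
--     for i in range(1, n):
--         p_idx = (current_idx - i + n) % n
--         if contours[p_idx] is not None:
--             prev_idx = p_idx
--             break
--     for i in range(1, n):
--         n_idx = (current_idx + i) % n
--         if contours[n_idx] is not None:
--             next_idx = n_idx
--             break
--     return prev_idx, next_idx
-- ===== SOURCE B (Python) =====
-- def _find_valid_neighbors(contours, current_idx):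
--     n = len(contours)
--     prev_idx, next_idx = -1, -1
--     best_back, best_fwd = n, n
--     for j, c in enumerate(contours):
--         if c is None:
--             continue
--         back = (current_idx - j) % n
--         if back == 0:
--             continue
--         fwd = n - back
--         if back < best_back:
--             best_back, prev_idx = back, j
--         if fwd < best_fwd:
--             best_fwd, next_idx = fwd, j
--     return prev_idx, next_idx
-- ===== Notes on version B (the rewrite author's own statement) =====
-- stated objective: alternative
-- what changed: Replaced the two outward-scanning early-break loops over circular offsets by a single pass over enumerate(contours) that minimizes the backward and forward modular distances simultaneously.
import Mathlib
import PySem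

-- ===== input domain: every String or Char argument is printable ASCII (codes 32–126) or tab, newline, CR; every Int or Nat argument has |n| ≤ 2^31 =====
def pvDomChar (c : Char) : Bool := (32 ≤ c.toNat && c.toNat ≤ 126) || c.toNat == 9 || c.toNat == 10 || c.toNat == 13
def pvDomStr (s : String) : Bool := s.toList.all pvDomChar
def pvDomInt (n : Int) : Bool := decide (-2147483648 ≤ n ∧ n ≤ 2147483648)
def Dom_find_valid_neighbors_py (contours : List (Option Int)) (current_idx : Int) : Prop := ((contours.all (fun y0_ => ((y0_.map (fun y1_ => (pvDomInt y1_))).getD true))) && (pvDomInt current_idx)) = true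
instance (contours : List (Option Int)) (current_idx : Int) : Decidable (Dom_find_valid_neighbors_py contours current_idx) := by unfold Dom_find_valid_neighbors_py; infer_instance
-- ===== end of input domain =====

-- B replaces A's two outward-scanning early-break loops by one minimizing pass over
-- enumerate(contours); same return value, objective: alternative decomposition (not faster).

-- ===== PORT A =====
-- `contours[idx] is not None` (idx always in range when A evaluates it)
def pvHit (contours : List (Option Int)) (idx : Int) : Bool :=
  ((PySem.List.pyGet? contours idx).getD none).isSome

-- one `for i in range(1, n): compute index; if hit: return it; ` loop (break = return),
-- used for both of A's loops with their respective index formulas; falls through to -1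
def pvLoopA (contours : List (Option Int)) (f : Int → Int) : List Int → Int
  | [] => -1
  | i :: rest =>
    if pvHit contours (f i) then f i else pvLoopA contours f rest

def find_valid_neighbors_py (contours : List (Option Int)) (current_idx : Int) : Int × Int :=
  let n : Int := contours.length
  let prev_idx : Int :=
    pvLoopA contours (fun i => PySem.Int.mod (current_idx - i + n) n) (PySem.List.pyRange 1 n 1)
  let next_idx : Int :=
    pvLoopA contours (fun i => PySem.Int.mod (current_idx + i) n) (PySem.List.pyRange 1 n 1)
  (prev_idx, next_idx)

-- ===== PORT B =====
-- loop body of B: state ((best_back, prev_idx), (best_fwd, next_idx))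
def pvStepB (c n : Int) (s : (Int × Int) × (Int × Int)) (jx : Int × Option Int) :
    (Int × Int) × (Int × Int) :=
  match jx.2 with
  | none => s
  | some _ =>
    let back := PySem.Int.mod (c - jx.1) n
    if back = 0 then s
    else
      let fwd := n - back
      let s1 := if back < s.1.1 then (back, jx.1) else s.1
      let s2 := if fwd < s.2.1 then (fwd, jx.1) else s.2
      (s1, s2)

def find_valid_neighbors_py_alt (contours : List (Option Int)) (current_idx : Int) : Int × Int :=
  let n : Int := contours.length
  let st := (PySem.List.enumerate contours 0).foldl (pvStepB current_idx n) ((n, -1), (n, -1))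
  (st.1.2, st.2.2)

-- ===== PRECONDITION & SPEC =====
def Spec_find_valid_neighbors_py (contours : List (Option Int)) (current_idx : Int) (out : Int × Int) : Prop := out = find_valid_neighbors_py_alt contours current_idx
instance (contours : List (Option Int)) (current_idx : Int) (out : Int × Int) : Decidable (Spec_find_valid_neighbors_py contours current_idx out) := by unfold Spec_find_valid_neighbors_py; infer_instance

-- ===== CLAIM (what is proved, stated in full; the proofs are below) =====
def Claim_equal_find_valid_neighbors_py : Prop := ∀ (contours : List (Option Int)) (current_idx : Int), Dom_find_valid_neighbors_py contours current_idx → Spec_find_valid_neighbors_py contours current_idx (find_valid_neighbors_py contours current_idx)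

-- ===== LEMMAS AND PROOFS =====

-- generic single-component version of B's step, distance function d abstracted
def pvStepGen (c n : Int) (d : Int → Int) (s : Int × Int) (jx : Int × Option Int) : Int × Int :=
  match jx.2 with
  | none => s
  | some _ =>
    if PySem.Int.mod (c - jx.1) n = 0 then s
    else if d jx.1 < s.1 then (d jx.1, jx.1) else s

-- an enumerate entry that B does not skip
def pvActive (c n : Int) (jx : Int × Option Int) : Prop :=
  jx.2.isSome = true ∧ PySem.Int.mod (c - jx.1) n ≠ 0

lemma pvStepB_eq (c n : Int) (s : (Int × Int) × (Int × Int)) (jx : Int × Option Int) :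
    pvStepB c n s jx =
      (pvStepGen c n (fun j => PySem.Int.mod (c - j) n) s.1 jx,
       pvStepGen c n (fun j => n - PySem.Int.mod (c - j) n) s.2 jx) := by
  rcases jx with ⟨j, x⟩
  cases x
  · rfl
  · simp only [pvStepB, pvStepGen]; split_ifs <;> rfl

lemma pvFoldB_split (c n : Int) (l : List (Int × Option Int)) (s : (Int × Int) × (Int × Int)) :
    l.foldl (pvStepB c n) s =
      (l.foldl (pvStepGen c n (fun j => PySem.Int.mod (c - j) n)) s.1,
       l.foldl (pvStepGen c n (fun j => n - PySem.Int.mod (c - j) n)) s.2) := by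
  induction l generalizing s with
  | nil => rfl
  | cons jx rest ih => simp only [List.foldl_cons, pvStepB_eq, ih]

-- characterization of A's break-loop as find? over the index list
lemma pvLoopA_eq (contours : List (Option Int)) (f : Int → Int) (l : List Int) :
    pvLoopA contours f l =
      match l.find? (fun i => pvHit contours (f i)) with
      | some i => f i
      | none => -1 := by
  induction l with
  | nil => rfl
  | cons i rest ih =>
    by_cases h : pvHit contours (f i) = true <;>
      simp [pvLoopA, h, ih]

-- find? over range [a,b) returns i0 when p i0 holds and p fails below i0
lemma pvFind?_pyRange_some (p : Int → Bool) (a b i0 : Int) (ha : a ≤ i0) (hb : i0 < b)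
    (hp : p i0 = true) (hmin : ∀ i, a ≤ i → i < i0 → p i = false) :
    (PySem.List.pyRange a b 1).find? p = some i0 := by
  rw [PySem.List.pyRange_one_append a i0 b ha (le_of_lt hb), List.find?_append]
  have h1 : (PySem.List.pyRange a i0 1).find? p = none := by
    rw [List.find?_eq_none]
    intro x hx
    rw [PySem.List.mem_pyRange_one] at hx
    simp [hmin x hx.1 hx.2]
  rw [h1, PySem.List.pyRange_one_cons hb]
  simp [hp]

-- the minimizing fold: either nothing was active (state unchanged, everything ≥ s.1),
-- or it returns an active entry of minimal distance that beat s.1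
lemma pvFoldGen_cases (c n : Int) (d : Int → Int) (l : List (Int × Option Int)) (s : Int × Int) :
    (l.foldl (pvStepGen c n d) s = s ∧ ∀ jx ∈ l, pvActive c n jx → s.1 ≤ d jx.1)
    ∨ (∃ jx ∈ l, pvActive c n jx ∧ l.foldl (pvStepGen c n d) s = (d jx.1, jx.1) ∧
        d jx.1 < s.1 ∧ ∀ jx' ∈ l, pvActive c n jx' → d jx.1 ≤ d jx'.1) := by
  induction l generalizing s with
  | nil => exact Or.inl ⟨rfl, by simp⟩
  | cons jx rest ih =>
    rcases jx with ⟨j, x⟩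
    by_cases hact : pvActive c n (j, x)
    · obtain ⟨hx, hm⟩ := hact
      cases x with
      | none => simp at hx
      | some v =>
        by_cases hlt : d j < s.1
        · have hstep : pvStepGen c n d s (j, some v) = (d j, j) := by
            simp [pvStepGen, hm, hlt]
          rcases ih ((d j, j)) with ⟨heq, hall⟩ | ⟨jx2, hmem, hact2, heq, hlt2, hall⟩
          · refine Or.inr ⟨(j, some v), List.mem_cons_self, ⟨hx, hm⟩, ?_, hlt, ?_⟩
            · simp only [List.foldl_cons, hstep, heq]
            · intro jx' hmem' hact'
              rcases List.mem_cons.mp hmem' with h | h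
              · subst h; rfl
              · exact hall jx' h hact'
          · refine Or.inr ⟨jx2, List.mem_cons_of_mem _ hmem, hact2, ?_, lt_trans hlt2 hlt, ?_⟩
            · simp only [List.foldl_cons, hstep, heq]
            · intro jx' hmem' hact'
              rcases List.mem_cons.mp hmem' with h | h
              · subst h; exact le_of_lt hlt2
              · exact hall jx' h hact'
        · have hstep : pvStepGen c n d s (j, some v) = s := by
            simp [pvStepGen, hm, hlt]
          rcases ih s with ⟨heq, hall⟩ | ⟨jx2, hmem, hact2, heq, hlt2, hall⟩
          · refine Or.inl ⟨by simp only [List.foldl_cons, hstep, heq], ?_⟩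
            intro jx' hmem' hact'
            rcases List.mem_cons.mp hmem' with h | h
            · subst h; exact le_of_not_gt hlt
            · exact hall jx' h hact'
          · refine Or.inr ⟨jx2, List.mem_cons_of_mem _ hmem, hact2,
              by simp only [List.foldl_cons, hstep, heq], hlt2, ?_⟩
            intro jx' hmem' hact'
            rcases List.mem_cons.mp hmem' with h | h
            · subst h; exact le_trans (le_of_lt hlt2) (le_of_not_gt hlt)
            · exact hall jx' h hact'
    · have hstep : pvStepGen c n d s (j, x) = s := by
        cases x with
        | none => rfl
        | some v =>
          have hm : PySem.Int.mod (c - j) n = 0 := by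
            by_contra hm
            exact hact ⟨rfl, hm⟩
          simp [pvStepGen, hm]
      rcases ih s with ⟨heq, hall⟩ | ⟨jx2, hmem, hact2, heq, hlt2, hall⟩
      · refine Or.inl ⟨by simp only [List.foldl_cons, hstep, heq], ?_⟩
        intro jx' hmem' hact'
        rcases List.mem_cons.mp hmem' with h | h
        · subst h; exact absurd hact' hact
        · exact hall jx' h hact'
      · refine Or.inr ⟨jx2, List.mem_cons_of_mem _ hmem, hact2,
          by simp only [List.foldl_cons, hstep, heq], hlt2, ?_⟩
        intro jx' hmem' hact'
        rcases List.mem_cons.mp hmem' with h | h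
        · subst h; exact absurd hact' hact
        · exact hall jx' h hact'

-- hit at an in-range index ↔ the element at that index (via enumerate) is some
lemma pvHit_of_mem (contours : List (Option Int)) (j : Int) (v : Int)
    (h : (j, some v) ∈ PySem.List.enumerate contours 0) : pvHit contours j = true := by
  rw [PySem.List.mem_enumerate_iff] at h
  obtain ⟨k, hk, hp⟩ := h
  have hj : j = (k : Int) := by
    have := congrArg Prod.fst hp; simpa using this
  have hv : contours[k] = some v := by
    have := congrArg Prod.snd hp; simpa using this.symm
  subst hj
  simp [pvHit, PySem.List.pyGet?_natCast, List.getElem?_eq_getElem hk, hv]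

lemma pvMem_of_hit (contours : List (Option Int)) (j : Int) (h0 : 0 ≤ j)
    (hn : j < (contours.length : Int)) (hh : pvHit contours j = true) :
    ∃ v : Int, (j, some v) ∈ PySem.List.enumerate contours 0 := by
  have hk : j.toNat < contours.length := by omega
  have hj : j = (j.toNat : Int) := by omega
  rw [hj] at hh ⊢
  simp only [pvHit, PySem.List.pyGet?_natCast, List.getElem?_eq_getElem hk] at hh
  cases hv : contours[j.toNat] with
  | none => rw [hv] at hh; simp at hh
  | some v =>
    refine ⟨v, ?_⟩
    rw [PySem.List.mem_enumerate_iff]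
    exact ⟨j.toNat, hk, by simp [hv]⟩

-- the per-component equivalence, parameterized by A's index map f and B's distance d
lemma pvComponent_eq (contours : List (Option Int)) (c : Int) (f d : Int → Int)
    (n : Int) (hN : n = (contours.length : Int)) (_hn : 0 < n)
    (H1 : ∀ i, 1 ≤ i → i < n → 0 ≤ f i ∧ f i < n ∧ d (f i) = i ∧ PySem.Int.mod (c - f i) n ≠ 0)
    (H2 : ∀ j, 0 ≤ j → j < n → PySem.Int.mod (c - j) n ≠ 0 →
      1 ≤ d j ∧ d j < n ∧ f (d j) = j) :
    pvLoopA contours f (PySem.List.pyRange 1 n 1) =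
      ((PySem.List.enumerate contours 0).foldl (pvStepGen c n d) (n, -1)).2 := by
  rw [pvLoopA_eq]
  rcases pvFoldGen_cases c n d (PySem.List.enumerate contours 0) (n, -1) with
    ⟨heq, hall⟩ | ⟨jx, hmem, hact, heq, _, hall⟩
  · -- nothing active: fold kept (n,-1); show find? = none, both sides -1
    have hnone : (PySem.List.pyRange 1 n 1).find? (fun i => pvHit contours (f i)) = none := by
      rw [List.find?_eq_none]
      intro i hi
      rw [PySem.List.mem_pyRange_one] at hi
      obtain ⟨hf0, hfn, hdf, hmz⟩ := H1 i hi.1 hi.2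
      intro hp
      obtain ⟨v, hv⟩ := pvMem_of_hit contours (f i) hf0 (by omega) hp
      have hge : n ≤ d (f i) := hall (f i, some v) hv ⟨rfl, hmz⟩
      omega
    rw [hnone, heq]
  · -- an active minimum jx: fold returns jx.1; show find? = some (d jx.1)
    rcases jx with ⟨j, x⟩
    obtain ⟨hx, hmz⟩ := hact
    cases x with
    | none => simp at hx
    | some v =>
      have hjrange : 0 ≤ j ∧ j < n := by
        rw [PySem.List.mem_enumerate_iff] at hmem
        obtain ⟨k, hk, hp⟩ := hmem
        have hj : j = 0 + (k : Int) := congrArg Prod.fst hp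
        omega
      obtain ⟨hd1, hdn, hfd⟩ := H2 j hjrange.1 hjrange.2 hmz
      have hsome : (PySem.List.pyRange 1 n 1).find? (fun i => pvHit contours (f i)) =
          some (d j) := by
        apply pvFind?_pyRange_some _ _ _ _ hd1 hdn
        · show pvHit contours (f (d j)) = true
          rw [hfd]
          exact pvHit_of_mem contours j v hmem
        · intro i hi1 hi2
          by_contra hp
          simp only [Bool.not_eq_false] at hp
          obtain ⟨hf0, hfn, hdf, hmz'⟩ := H1 i hi1 (by omega)
          obtain ⟨v', hv'⟩ := pvMem_of_hit contours (f i) hf0 (by omega) hp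
          have hge : d j ≤ d (f i) := hall (f i, some v') hv' ⟨rfl, hmz'⟩
          omega
      rw [hsome, heq]
      simpa using hfd

-- arithmetic: PySem mod with positive divisor is emod
lemma pvMod_eq (a n : Int) (hn : 0 < n) : PySem.Int.mod a n = a % n :=
  PySem.Int.mod_eq_emod_of_pos hn

lemma pvEmod_sub_emod (a b n : Int) : (a - b % n) % n = (a - b) % n := by
  conv_rhs => rw [Int.sub_emod]
  rw [Int.sub_emod, Int.emod_emod_of_dvd _ dvd_rfl]

-- ===== VERDICT (by name: the statement is the Claim_ definition above) =====
theorem find_valid_neighbors_py_spec : Claim_equal_find_valid_neighbors_py := by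
  intro contours c _
  unfold Spec_find_valid_neighbors_py
  cases hcon : contours with
  | nil => rfl
  | cons y ys =>
  rw [← hcon]
  have hn : 0 < (contours.length : Int) := by simp [hcon]
  set n : Int := (contours.length : Int) with hN
  have hA : find_valid_neighbors_py contours c =
      (pvLoopA contours (fun i => PySem.Int.mod (c - i + n) n) (PySem.List.pyRange 1 n 1),
       pvLoopA contours (fun i => PySem.Int.mod (c + i) n) (PySem.List.pyRange 1 n 1)) := rfl
  have hB : find_valid_neighbors_py_alt contours c =
      ((((PySem.List.enumerate contours 0).foldl (pvStepB c n) ((n, -1), (n, -1))).1.2),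
       (((PySem.List.enumerate contours 0).foldl (pvStepB c n) ((n, -1), (n, -1))).2.2)) := rfl
  rw [pvFoldB_split] at hB
  have hprev := pvComponent_eq contours c
    (fun i => PySem.Int.mod (c - i + n) n) (fun j => PySem.Int.mod (c - j) n) n rfl hn
    (by
      intro i hi1 hi2
      simp only [pvMod_eq _ _ hn]
      have h0 : 0 ≤ (c - i + n) % n := Int.emod_nonneg _ (by omega)
      have h1 : (c - i + n) % n < n := Int.emod_lt_of_pos _ hn
      have h2 : (c - (c - i + n) % n) % n = i := by
        rw [pvEmod_sub_emod]
        have he : c - (c - i + n) = i - n := by ring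
        rw [he, Int.sub_emod_right, Int.emod_eq_of_lt (by omega) (by omega)]
      exact ⟨h0, h1, h2, by omega⟩)
    (by
      intro j hj0 hjn hmz
      simp only [pvMod_eq _ _ hn] at hmz ⊢
      have h0 : 0 ≤ (c - j) % n := Int.emod_nonneg _ (by omega)
      have h1 : (c - j) % n < n := Int.emod_lt_of_pos _ hn
      have h2 : (c - (c - j) % n + n) % n = j := by
        rw [Int.add_emod_right, pvEmod_sub_emod]
        have he : c - (c - j) = j := by ring
        rw [he, Int.emod_eq_of_lt (by omega) (by omega)]
      exact ⟨by omega, by omega, h2⟩)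
  have hnext := pvComponent_eq contours c
    (fun i => PySem.Int.mod (c + i) n) (fun j => n - PySem.Int.mod (c - j) n) n rfl hn
    (by
      intro i hi1 hi2
      simp only [pvMod_eq _ _ hn]
      have h0 : 0 ≤ (c + i) % n := Int.emod_nonneg _ (by omega)
      have h1 : (c + i) % n < n := Int.emod_lt_of_pos _ hn
      have h2 : (c - (c + i) % n) % n = n - i := by
        rw [pvEmod_sub_emod]
        have he : c - (c + i) = (n - i) - n := by ring
        rw [he, Int.sub_emod_right, Int.emod_eq_of_lt (by omega) (by omega)]
      exact ⟨h0, h1, by omega, by omega⟩)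
    (by
      intro j hj0 hjn hmz
      simp only [pvMod_eq _ _ hn] at hmz ⊢
      have h0 : 0 ≤ (c - j) % n := Int.emod_nonneg _ (by omega)
      have h1 : (c - j) % n < n := Int.emod_lt_of_pos _ hn
      have h2 : (c + (n - (c - j) % n)) % n = j := by
        have he : c + (n - (c - j) % n) = (c - (c - j) % n) + n := by ring
        rw [he, Int.add_emod_right, pvEmod_sub_emod]
        have he2 : c - (c - j) = j := by ring
        rw [he2, Int.emod_eq_of_lt (by omega) (by omega)]
      exact ⟨by omega, by omega, h2⟩)
  rw [hA, hB]
  exact Prod.ext hprev hnext
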